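-- pv_equiv track=rewrite | github.com/REXIANN/AlgorithmSolving | midasit/1.py | solution
-- ===== SOURCE A (Python) =====
-- def solution(openA, closeB):
--     setA = set(openA)
--     setB = set(closeB)
--     is_open = False
--     count = 0
--     gap = 0
--     for i in range(1, closeB[-1] + 1):
--         if i in setA:
--             if is_open:
--                 pass
--             else:
--                 is_open = True
--                 gap = i
--         if i in setB and is_open:
--             is_open = False
--             count += i - gap
--
--     return count
-- ===== SOURCE B (Python) =====
-- def solution(openA, closeB):
--     # Stateless characterization: position x is "inside a matched interval" iff some
--     # open position a <= x has no close position in [a, x]; the answer is the number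
--     # of such x in 1..closeB[-1].
--     def open_at(x):
--         return any(1 <= a <= x and not any(a <= b <= x for b in closeB)
--                    for a in openA)
--     return sum(1 for x in range(1, closeB[-1] + 1) if open_at(x))
-- ===== Notes on version B (the rewrite author's own statement) =====
-- stated objective: alternative
-- what changed: Replaces A's stateful open/close automaton (is_open/gap/count carried across the scan) by a stateless per-position count: position x is counted iff some open position a <= x has no close position in [a, x]; no state is threaded between positions.
import Mathlib
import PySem

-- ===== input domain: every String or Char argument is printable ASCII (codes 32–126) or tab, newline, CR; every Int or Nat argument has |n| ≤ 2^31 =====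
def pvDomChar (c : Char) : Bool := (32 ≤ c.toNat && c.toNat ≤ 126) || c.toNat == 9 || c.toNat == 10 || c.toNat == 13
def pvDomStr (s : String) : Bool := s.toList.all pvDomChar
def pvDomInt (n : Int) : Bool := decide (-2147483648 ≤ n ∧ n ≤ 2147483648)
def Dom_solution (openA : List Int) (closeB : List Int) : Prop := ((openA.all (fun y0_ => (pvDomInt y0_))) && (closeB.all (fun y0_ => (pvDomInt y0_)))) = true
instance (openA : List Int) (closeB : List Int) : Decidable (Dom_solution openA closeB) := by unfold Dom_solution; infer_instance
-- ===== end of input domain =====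

-- B replaces A's stateful open/close automaton by a stateless per-position count: a position
-- x is counted iff some open position a ≤ x has no close position in [a, x]. Same value
-- wherever A returns (Pre_ excludes only closeB = [], where A raises IndexError).

-- ===== PORT A =====
-- A scans i = 1 .. closeB[-1]; opens at members of set(openA) when closed, closes at
-- members of set(closeB) when open, adding i - gap.
def solution (openA : List Int) (closeB : List Int) : Int :=
  let setA := PySem.Set.ofList openA
  let setB := PySem.Set.ofList closeB
  let last := PySem.List.pyGetD closeB (-1) 0   -- closeB[-1]; IndexError on [] is excluded by Pre_solution
  (((PySem.List.pyRange 1 (last + 1) 1).foldl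
    (fun (st : Bool × Int × Int) i =>
      let st1 := if PySem.Set.contains setA i then
                   (if st.1 then st else (true, i, st.2.2))
                 else st
      if PySem.Set.contains setB i && st1.1 then (false, st1.2.1, st1.2.2 + (i - st1.2.1)) else st1)
    (false, 0, 0))).2.2

-- ===== PORT B =====
-- open_at(x): some open position a ≤ x has no close position in [a, x]
def pvOpenAt (openA : List Int) (closeB : List Int) (x : Int) : Bool :=
  openA.any (fun a =>
    decide (1 ≤ a) && decide (a ≤ x) &&
      !(closeB.any (fun b => decide (a ≤ b) && decide (b ≤ x))))

-- B counts the positions x in 1 .. closeB[-1] with open_at(x): no automaton state.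
def solution_alt (openA : List Int) (closeB : List Int) : Int :=
  (PySem.List.pyRange 1 (PySem.List.pyGetD closeB (-1) 0 + 1) 1).foldl
    (fun acc x => acc + (if pvOpenAt openA closeB x then 1 else 0)) 0

-- ===== PRECONDITION & SPEC =====
-- Pre_ excludes only closeB = [], on which A raises IndexError at closeB[-1] (B raises there too).
def Pre_solution (openA : List Int) (closeB : List Int) : Prop := closeB ≠ []
instance (openA : List Int) (closeB : List Int) : Decidable (Pre_solution openA closeB) := by unfold Pre_solution; infer_instance
def pvWitness_solution : List Int × List Int := ([2, 5, 9], [3, 7, 8])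

def Spec_solution (openA : List Int) (closeB : List Int) (out : Int) : Prop := out = solution_alt openA closeB
instance (openA : List Int) (closeB : List Int) (out : Int) : Decidable (Spec_solution openA closeB out) := by unfold Spec_solution; infer_instance

-- ===== CLAIM (what is proved, stated in full; the proofs are below) =====
def Claim_equal_solution : Prop := ∀ (openA : List Int) (closeB : List Int), Dom_solution openA closeB → Pre_solution openA closeB → Spec_solution openA closeB (solution openA closeB)

-- ===== LEMMAS AND PROOFS =====

-- A's fold body, named for the proofs (definitionally the lambda in `solution`)
def pvStepA (openA closeB : List Int) (st : Bool × Int × Int) (i : Int) : Bool × Int × Int :=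
  let st1 := if PySem.Set.contains (PySem.Set.ofList openA) i then
               (if st.1 then st else (true, i, st.2.2))
             else st
  if PySem.Set.contains (PySem.Set.ofList closeB) i && st1.1 then (false, st1.2.1, st1.2.2 + (i - st1.2.1)) else st1

lemma solution_eq_fold (openA closeB : List Int) :
    solution openA closeB
      = ((PySem.List.pyRange 1 (PySem.List.pyGetD closeB (-1) 0 + 1) 1).foldl
          (pvStepA openA closeB) (false, 0, 0)).2.2 := rfl

lemma openAt_nonpos (openA closeB : List Int) (x : Int) (hx : x < 1) :
    pvOpenAt openA closeB x = false := by
  simp only [pvOpenAt]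
  simp
  intro a _ h1 h2
  exfalso; omega

lemma openAt_mem_close (openA closeB : List Int) (x : Int) (hx : x ∈ closeB) :
    pvOpenAt openA closeB x = false := by
  simp only [pvOpenAt]
  simp
  intro a _ _ h2
  exact ⟨x, hx, h2, le_refl x⟩

lemma openAt_succ (openA closeB : List Int) (x : Int) (hx : 1 ≤ x) :
    pvOpenAt openA closeB x
      = ((!(closeB.contains x)) && (pvOpenAt openA closeB (x - 1) || openA.contains x)) := by
  rw [Bool.eq_iff_iff]
  simp only [pvOpenAt]
  simp
  constructor
  · rintro ⟨a, ha, ⟨h1, h2⟩, h3⟩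
    have hxB : x ∉ closeB := fun hb => absurd (h3 x hb h2) (by omega)
    refine ⟨hxB, ?_⟩
    by_cases hax : a = x
    · right; exact hax ▸ ha
    · left
      exact ⟨a, ha, ⟨h1, by omega⟩, fun b hb hab => by have := h3 b hb hab; omega⟩
  · rintro ⟨hxB, ⟨a, ha, ⟨h1, h2⟩, h3⟩ | hxA⟩
    · refine ⟨a, ha, ⟨h1, by omega⟩, fun b hb hab => ?_⟩
      have hxb := h3 b hb hab
      have : b ≠ x := fun h => hxB (h ▸ hb)
      omega
    · refine ⟨x, hxA, ⟨hx, le_refl x⟩, fun b hb hxb => ?_⟩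
      have : b ≠ x := fun h => hxB (h ▸ hb)
      omega

lemma set_contains_iff (l : List Int) (x : Int) :
    PySem.Set.contains (PySem.Set.ofList l) x = l.contains x := by
  rw [Bool.eq_iff_iff]
  simp [PySem.Set.mem_ofList, List.contains_eq_mem]

-- the invariant: after scanning 1..n, A's flag is pvOpenAt n, and A's count plus the
-- still-open span equals B's per-position sum over 1..n
lemma pv_invariant (openA closeB : List Int) (n : Nat) :
    ((PySem.List.pyRange 1 ((n : Int) + 1) 1).foldl (pvStepA openA closeB) (false, 0, 0)).1
        = pvOpenAt openA closeB (n : Int) ∧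
    ((PySem.List.pyRange 1 ((n : Int) + 1) 1).foldl (pvStepA openA closeB) (false, 0, 0)).2.2
        + (if ((PySem.List.pyRange 1 ((n : Int) + 1) 1).foldl (pvStepA openA closeB) (false, 0, 0)).1
             then (n : Int) - ((PySem.List.pyRange 1 ((n : Int) + 1) 1).foldl (pvStepA openA closeB) (false, 0, 0)).2.1 + 1 else 0)
      = (PySem.List.pyRange 1 ((n : Int) + 1) 1).foldl
          (fun acc x => acc + (if pvOpenAt openA closeB x then 1 else 0)) 0 := by
  induction n with
  | zero =>
    rw [show ((0 : Nat) : Int) + 1 = 1 by norm_num, PySem.List.pyRange_one_eq_nil (by omega)]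
    simp [openAt_nonpos openA closeB 0 (by omega)]
  | succ n ih =>
    have hsplit : PySem.List.pyRange 1 ((↑(n + 1) : Int) + 1) 1
        = PySem.List.pyRange 1 ((n : Int) + 1) 1 ++ [(n : Int) + 1] := by
      push_cast
      exact PySem.List.pyRange_one_succ_right (by omega)
    rw [hsplit]
    simp only [List.foldl_append, List.foldl_cons, List.foldl_nil]
    obtain ⟨ih1, ih2⟩ := ih
    set st := (PySem.List.pyRange 1 ((n : Int) + 1) 1).foldl (pvStepA openA closeB) (false, 0, 0) with hst
    have hopen := openAt_succ openA closeB ((n : Int) + 1) (by omega)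
    rw [show (n : Int) + 1 - 1 = (n : Int) by ring] at hopen
    have hcast : (↑(n + 1) : Int) = (n : Int) + 1 := by push_cast; ring
    rw [hcast]
    unfold pvStepA
    rw [set_contains_iff, set_contains_iff]
    cases hB : closeB.contains ((n : Int) + 1) <;>
      cases hA : openA.contains ((n : Int) + 1) <;>
        cases hO : st.1 <;>
          (have hPn := ih1.symm.trans hO) <;>
          rw [hO] at ih2 <;>
          (try simp at ih2) <;>
          (have hA' := hA) <;> (have hB' := hB) <;>
          simp at hA' hB' <;>
          simp [hopen, hPn, hA', hB', hO] <;>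
          omega

-- closeB[-1] is a member of closeB when closeB ≠ []
lemma last_mem (closeB : List Int) (h : closeB ≠ []) :
    PySem.List.pyGetD closeB (-1) 0 ∈ closeB := by
  have hg : PySem.List.pyGet? closeB (-1) = closeB.getLast? := PySem.List.pyGet?_neg_one closeB
  have hne : closeB.getLast? = some (closeB.getLast h) := List.getLast?_eq_some_getLast h
  have hval : PySem.List.pyGetD closeB (-1) 0 = closeB.getLast h := by
    simp [PySem.List.pyGetD, hg, hne]
  rw [hval]
  exact List.getLast_mem h

-- ===== VERDICT (by name: the statement is the Claim_ definition above) =====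
theorem solution_spec : Claim_equal_solution := by
  intro openA closeB _ hpre
  show solution openA closeB = solution_alt openA closeB
  rw [solution_eq_fold]
  unfold solution_alt
  set last := PySem.List.pyGetD closeB (-1) 0 with hlast
  by_cases hpos : 1 ≤ last
  · have hcast : ((last.toNat : Int)) = last := Int.toNat_of_nonneg (by omega)
    have hinv := pv_invariant openA closeB last.toNat
    rw [hcast] at hinv
    obtain ⟨h1, h2⟩ := hinv
    rw [openAt_mem_close openA closeB last (last_mem closeB hpre)] at h1
    rw [h1] at h2
    simpa using h2
  · rw [PySem.List.pyRange_one_eq_nil (by omega)]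
    simp
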